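-- pv_equiv track=rewrite | github.com/damarisarmoa12/Intro | parcialpython.py | ap_antes_corte
-- ===== SOURCE A (Python) =====
-- def ap_antes_corte (c : str, s : str) -> int:
--    res = 0
--    i = 0
--    saldo = 0
--
--    while i < len(s):
--       if s[i] == "r":
--          saldo += 350
--       if s[i] == "v":
--          saldo -= 56
--       if s[i] == c:
--          res += 1
--       if s[i] == "x" or saldo < 0:
--          break
--       i += 1
--
--    return res
-- ===== SOURCE B (Python) =====
-- def ap_antes_corte(c, s):
--     # Stage 1: running balance after each character (arithmetic, no branching).
--     saldo_after = []
--     t = 0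
--     for ch in s:
--         t += 350 * (ch == "r") - 56 * (ch == "v")
--         saldo_after.append(t)
--     # Stage 2: first index where the loop would break (inclusive), else whole string.
--     stop = next((i + 1 for i, ch in enumerate(s)
--                  if ch == "x" or saldo_after[i] < 0), len(s))
--     # Stage 3: count characters equal to c in the processed prefix.
--     return sum(ch == c for ch in s[:stop])
-- ===== Notes on version B (the rewrite author's own statement) =====
-- stated objective: alternative
-- what changed: A interleaves balance update, counting and the break test in one while-loop over indices; B is staged: it first materialises the list of running balances arithmetically, then locates the inclusive stop index as the first position whose char is 'x' or whose balance is negative (via next/enumerate, findIdx? in the port), and finally counts c over the sliced prefix.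
import Mathlib
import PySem

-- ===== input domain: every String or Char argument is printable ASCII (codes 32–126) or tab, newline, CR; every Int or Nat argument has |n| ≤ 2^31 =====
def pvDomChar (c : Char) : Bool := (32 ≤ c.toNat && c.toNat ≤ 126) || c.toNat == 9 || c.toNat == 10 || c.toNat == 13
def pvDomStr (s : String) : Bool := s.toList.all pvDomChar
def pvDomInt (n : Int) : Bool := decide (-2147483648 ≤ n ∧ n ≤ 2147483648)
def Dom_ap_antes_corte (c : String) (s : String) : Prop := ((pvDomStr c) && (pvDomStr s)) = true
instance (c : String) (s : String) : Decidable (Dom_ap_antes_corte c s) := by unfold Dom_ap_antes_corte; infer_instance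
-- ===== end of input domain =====

-- B restructures A's single while-loop into three staged passes (balance list, stop-index search, prefix count) of the same cost; return value proved equal.


-- ===== PORT A =====
-- Literal port of A's while loop: state (saldo, res), same update order r, v, count, break.
def apLoopA (c : String) : List Char → Int → Int → Int
  | [], _, res => res
  | ch :: rest, saldo, res =>
    let saldo := if ch == 'r' then saldo + 350 else saldo
    let saldo := if ch == 'v' then saldo - 56 else saldo
    let res := if String.mk [ch] == c then res + 1 else res
    if ch == 'x' || saldo < 0 then res else apLoopA c rest saldo res

def ap_antes_corte (c : String) (s : String) : Int := apLoopA c s.toList 0 0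

-- ===== PORT B =====
-- Stage 1 of Source B: the list of running balances after each character.
def apBalances : List Char → Int → List Int
  | [], _ => []
  | ch :: rest, t =>
    let t := t + 350 * (if ch == 'r' then 1 else 0) - 56 * (if ch == 'v' then 1 else 0)
    t :: apBalances rest t

-- Stages 2 and 3 of Source B: first break position (next/enumerate → findIdx? over the
-- zipped char/balance list), then count c over the sliced prefix.
def ap_antes_corte_alt (c : String) (s : String) : Int :=
  let l := s.toList
  let stop := match (l.zip (apBalances l 0)).findIdx? (fun p => p.1 == 'x' || p.2 < 0) with
    | some i => i + 1
    | none => l.length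
  ((l.take stop).countP (fun ch => String.mk [ch] == c) : Int)

-- ===== PRECONDITION & SPEC =====
def Spec_ap_antes_corte (c : String) (s : String) (out : Int) : Prop := out = ap_antes_corte_alt c s
instance (c : String) (s : String) (out : Int) : Decidable (Spec_ap_antes_corte c s out) := by unfold Spec_ap_antes_corte; infer_instance

-- ===== CLAIM (what is proved, stated in full; the proofs are below) =====
def Claim_equal_ap_antes_corte : Prop := ∀ (c : String) (s : String), Dom_ap_antes_corte c s → Spec_ap_antes_corte c s (ap_antes_corte c s)

-- ===== LEMMAS AND PROOFS =====

-- B's stop value as a function of the start balance (used only in the proof).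
def apStop (l : List Char) (t : Int) : Nat :=
  match (l.zip (apBalances l t)).findIdx? (fun p => p.1 == 'x' || p.2 < 0) with
  | some i => i + 1
  | none => l.length

theorem apStop_cons (ch : Char) (rest : List Char) (t : Int) :
    apStop (ch :: rest) t =
      (if ch == 'x' || (t + 350 * (if ch == 'r' then 1 else 0) - 56 * (if ch == 'v' then 1 else 0) < 0 : Bool)
       then 1
       else apStop rest (t + 350 * (if ch == 'r' then 1 else 0) - 56 * (if ch == 'v' then 1 else 0)) + 1) := by
  simp only [apStop, apBalances, List.zip_cons_cons, List.findIdx?_cons]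
  by_cases hb : (ch == 'x' || (t + 350 * (if ch == 'r' then 1 else 0) - 56 * (if ch == 'v' then 1 else 0) < 0 : Bool)) = true
  · rw [if_pos hb, if_pos hb]
  · rw [if_neg hb, if_neg hb]
    cases h : (rest.zip (apBalances rest (t + 350 * (if ch == 'r' then 1 else 0) - 56 * (if ch == 'v' then 1 else 0)))).findIdx? (fun p => p.1 == 'x' || p.2 < 0) with
    | none => simp [h]
    | some i => simp [h]

theorem apLoopA_eq_count (c : String) (l : List Char) : ∀ (saldo res : Int),
    apLoopA c l saldo res
      = res + ((l.take (apStop l saldo)).countP (fun ch => String.mk [ch] == c) : Int) := by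
  induction l with
  | nil => intro saldo res; simp [apLoopA, apStop, apBalances]
  | cons ch rest ih =>
    intro saldo res
    rw [apStop_cons]
    simp only [apLoopA]
    have hsal : (if ch == 'v' then (if ch == 'r' then saldo + 350 else saldo) - 56
        else (if ch == 'r' then saldo + 350 else saldo))
        = saldo + 350 * (if ch == 'r' then 1 else 0) - 56 * (if ch == 'v' then 1 else 0) := by
      by_cases hr : (ch == 'r') = true <;> by_cases hv : (ch == 'v') = true <;>
        simp_all <;> ring
    rw [hsal]
    by_cases hb : (ch == 'x' || (saldo + 350 * (if ch == 'r' then 1 else 0) - 56 * (if ch == 'v' then 1 else 0) < 0 : Bool)) = true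
    · simp only [hb, if_true]
      by_cases hc : (String.mk [ch] == c) = true <;>
        simp [hc, List.countP_cons] <;> ring
    · simp only [hb, if_false, Bool.false_eq_true]
      rw [ih]
      by_cases hc : (String.mk [ch] == c) = true <;>
        simp [hc, List.countP_cons] <;> ring

-- ===== VERDICT (by name: the statement is the Claim_ definition above) =====
theorem ap_antes_corte_spec : Claim_equal_ap_antes_corte := by
  intro c s _
  unfold Spec_ap_antes_corte ap_antes_corte ap_antes_corte_alt
  rw [apLoopA_eq_count]
  simp [apStop]
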